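-- pv_equiv track=rewrite | github.com/ohtjqkd/algorithm | programmers/undestroyedStructure.py | solution
-- ===== SOURCE A (Python) =====
-- def solution(board, skill):
--     answer = 0
--     N, M = len(board), len(board[0])
--     dp = [[0 for _ in range(M + 2)] for _ in range(N + 2)] # padding + 2
--     for t, r1, c1, r2, c2, d in skill:
--         if t == 1:
--             sign = -1
--         else:
--             sign = 1
--         dp[r1 + 1][c1 + 1] += (sign * d)
--         dp[r2 + 2][c2 + 2] += (sign * d) # key point!
--         dp[r1 + 1][c2 + 2] -= (sign * d)
--         dp[r2 + 2][c1 + 1] -= (sign * d)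
--     for n in range(1, N + 2):
--         for m in range(1, M + 2):
--             dp[n][m] += dp[n][m-1]
--     for m in range(1, M + 2):
--         for n in range(1, N + 2):
--             dp[n][m] += dp[n-1][m]
--
--     for i in range(N):
--         for j in range(M):
--             if board[i][j] + dp[i+1][j+1] > 0:
--                 answer += 1
--     return answer
-- ===== SOURCE B (Python) =====
-- def solution(board, skill):
--     N, M = len(board), len(board[0])
--     damage = [[0] * M for _ in range(N)]
--     for t, r1, c1, r2, c2, d in skill:
--         sign = -1 if t == 1 else 1
--         for i in range(r1, r2 + 1):
--             for j in range(c1, c2 + 1):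
--                 damage[i][j] += sign * d
--     return sum(1 for i in range(N) for j in range(M)
--                if board[i][j] + damage[i][j] > 0)
-- ===== Notes on version B (the rewrite author's own statement) =====
-- stated objective: simpler
-- what changed: Replaces the 2D difference array with four point updates per skill plus two prefix-sum sweeps by direct per-rectangle damage accumulation into a separate grid, then one counting pass.
-- outside the precondition, e.g. on solution([[1]], [[1, -1, -1, -1, -1, 1]]): A returns 1, B returns 0
import Mathlib
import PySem

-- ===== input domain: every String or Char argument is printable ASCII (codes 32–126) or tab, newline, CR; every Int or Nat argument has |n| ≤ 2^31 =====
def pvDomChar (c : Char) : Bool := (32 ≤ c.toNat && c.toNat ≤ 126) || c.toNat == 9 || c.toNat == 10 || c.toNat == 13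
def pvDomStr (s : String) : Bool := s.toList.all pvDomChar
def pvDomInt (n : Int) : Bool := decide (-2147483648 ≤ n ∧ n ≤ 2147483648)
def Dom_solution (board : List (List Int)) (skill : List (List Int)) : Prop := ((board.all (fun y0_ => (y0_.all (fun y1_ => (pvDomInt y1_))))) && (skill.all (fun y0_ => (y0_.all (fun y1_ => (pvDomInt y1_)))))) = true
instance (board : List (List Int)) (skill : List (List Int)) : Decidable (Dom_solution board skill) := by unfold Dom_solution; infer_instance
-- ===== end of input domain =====

-- B replaces A's difference-array + two prefix-sum passes with direct per-rectangle
-- damage updates and a single counting pass (objective: simpler; neither mutates its input).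

-- ===== PORT A =====
-- the mutable 2D list dp is ported as a grid function Int → Int → Int; dp[r][c] += v is dpAdd
-- (exact for the in-range nonnegative indices Pre_solution admits)
def dpAdd (g : Int → Int → Int) (r c v : Int) : Int → Int → Int :=
  fun a b => if a = r ∧ b = c then g a b + v else g a b

def solution (board : List (List Int)) (skill : List (List Int)) : Int :=
  let N : Int := board.length
  let M : Int := ((PySem.List.pyGetD board 0 []).length : Int)
  -- for t, r1, c1, r2, c2, d in skill: four difference-array point updates
  let dp1 : Int → Int → Int := skill.foldl (fun dp s =>
    match s with
    | [t, r1, c1, r2, c2, d] =>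
        let sign : Int := if t = 1 then -1 else 1
        dpAdd (dpAdd (dpAdd (dpAdd dp (r1+1) (c1+1) (sign*d))
          (r2+2) (c2+2) (sign*d)) (r1+1) (c2+2) (-(sign*d))) (r2+2) (c1+1) (-(sign*d))
    | _ => dp) (fun _ _ => 0)
  -- for n in range(1, N+2): for m in range(1, M+2): dp[n][m] += dp[n][m-1]
  let dp2 : Int → Int → Int := (PySem.List.pyRange 1 (N+2) 1).foldl (fun dp n =>
      (PySem.List.pyRange 1 (M+2) 1).foldl (fun dp m => dpAdd dp n m (dp n (m-1))) dp) dp1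
  -- for m in range(1, M+2): for n in range(1, N+2): dp[n][m] += dp[n-1][m]
  let dp3 : Int → Int → Int := (PySem.List.pyRange 1 (M+2) 1).foldl (fun dp m =>
      (PySem.List.pyRange 1 (N+2) 1).foldl (fun dp n => dpAdd dp n m (dp (n-1) m)) dp) dp2
  (PySem.List.pyRange 0 N 1).foldl (fun acc i =>
    (PySem.List.pyRange 0 M 1).foldl (fun acc j =>
      if PySem.List.pyGetD (PySem.List.pyGetD board i []) j 0 + dp3 (i+1) (j+1) > 0
      then acc + 1 else acc) acc) 0

-- ===== PORT B =====
-- damage[i][j] += v, same grid-function representation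
def dmgAdd (g : Int → Int → Int) (r c v : Int) : Int → Int → Int :=
  fun a b => if a = r ∧ b = c then g a b + v else g a b

def solution_alt (board : List (List Int)) (skill : List (List Int)) : Int :=
  let N : Int := board.length
  let M : Int := ((PySem.List.pyGetD board 0 []).length : Int)
  -- direct per-rectangle updates; the tuple unpacking 'for t, r1, c1, r2, c2, d in skill'
  -- is ported by positional access (exact for the 6-tuples Pre_solution admits)
  let damage : Int → Int → Int := skill.foldl (fun g s =>
    let t := PySem.List.pyGetD s 0 0
    let r1 := PySem.List.pyGetD s 1 0
    let c1 := PySem.List.pyGetD s 2 0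
    let r2 := PySem.List.pyGetD s 3 0
    let c2 := PySem.List.pyGetD s 4 0
    let d := PySem.List.pyGetD s 5 0
    let sign : Int := if t = 1 then -1 else 1
    (PySem.List.pyRange r1 (r2+1) 1).foldl (fun g i =>
      (PySem.List.pyRange c1 (c2+1) 1).foldl (fun g j => dmgAdd g i j (sign*d)) g) g) (fun _ _ => 0)
  -- sum(1 for i in range(N) for j in range(M) if board[i][j] + damage[i][j] > 0)
  (PySem.List.pyRange 0 N 1).foldl (fun acc i =>
    (PySem.List.pyRange 0 M 1).foldl (fun acc j =>
      if PySem.List.pyGetD (PySem.List.pyGetD board i []) j 0 + damage i j > 0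
      then acc + 1 else acc) acc) 0

-- ===== PRECONDITION & SPEC =====
-- Pre_ restricts skill to the problem's natural domain (each entry [t,r1,c1,r2,c2,d] a
-- rectangle with 0 ≤ r1 ≤ r2 < N, 0 ≤ c1 ≤ c2 < M), board nonempty with rows of length ≥ M:
-- outside it A raises (IndexError/ValueError) or, via Python negative-index wraparound and
-- inverted rectangles, returns accidental values B does not reproduce.
def Pre_solution (board : List (List Int)) (skill : List (List Int)) : Prop :=
  board ≠ [] ∧
  (∀ row ∈ board, (PySem.List.pyGetD board 0 []).length ≤ row.length) ∧
  (∀ s ∈ skill, s.length = 6 ∧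
     0 ≤ PySem.List.pyGetD s 1 0 ∧
     PySem.List.pyGetD s 1 0 ≤ PySem.List.pyGetD s 3 0 ∧
     PySem.List.pyGetD s 3 0 < (board.length : Int) ∧
     0 ≤ PySem.List.pyGetD s 2 0 ∧
     PySem.List.pyGetD s 2 0 ≤ PySem.List.pyGetD s 4 0 ∧
     PySem.List.pyGetD s 4 0 < ((PySem.List.pyGetD board 0 []).length : Int))
instance (board : List (List Int)) (skill : List (List Int)) : Decidable (Pre_solution board skill) := by
  unfold Pre_solution; infer_instance

def pvWitness_solution : List (List Int) × List (List Int) :=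
  ([[5, 5], [5, 5]], [[1, 0, 0, 1, 1, 4], [2, 0, 0, 0, 1, 2]])

def Spec_solution (board : List (List Int)) (skill : List (List Int)) (out : Int) : Prop := out = solution_alt board skill
instance (board : List (List Int)) (skill : List (List Int)) (out : Int) : Decidable (Spec_solution board skill out) := by unfold Spec_solution; infer_instance

-- ===== CLAIM (what is proved, stated in full; the proofs are below) =====
def Claim_equal_solution : Prop := ∀ (board : List (List Int)) (skill : List (List Int)), Dom_solution board skill → Pre_solution board skill → Spec_solution board skill (solution board skill)


-- ===== LEMMAS AND PROOFS =====

-- 0/1 indicator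
def ind (a b : Int) : Int := if a = b then 1 else 0

-- point-update contribution of one skill entry to dp cell (n, m) in A's difference array
def pdelta (s : List Int) (n m : Int) : Int :=
  match s with
  | [t, r1, c1, r2, c2, d] =>
      ((if t = 1 then (-1 : Int) else 1) * d) *
        ((ind n (r1+1) - ind n (r2+2)) * (ind m (c1+1) - ind m (c2+2)))
  | _ => 0

-- rectangle contribution of one skill entry to B's damage cell (a, b)
def bdelta (s : List Int) (a b : Int) : Int :=
  if PySem.List.pyGetD s 1 0 ≤ a ∧ a ≤ PySem.List.pyGetD s 3 0 ∧
      PySem.List.pyGetD s 2 0 ≤ b ∧ b ≤ PySem.List.pyGetD s 4 0 then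
    (if PySem.List.pyGetD s 0 0 = 1 then (-1 : Int) else 1) * PySem.List.pyGetD s 5 0
  else 0

def rsum (g : Int → Int → Int) (n : Int) (b : Nat) : Int := ∑ k ∈ Finset.range (b+1), g n (k : Int)
def csum (g : Int → Int → Int) (m : Int) (a : Nat) : Int := ∑ r ∈ Finset.range (a+1), g (r : Int) m

theorem dpAdd_apply (g : Int → Int → Int) (r c v a b : Int) :
    dpAdd g r c v a b = g a b + ind a r * ind b c * v := by
  unfold dpAdd ind; split_ifs <;> simp_all

theorem dmgAdd_apply (g : Int → Int → Int) (r c v a b : Int) :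
    dmgAdd g r c v a b = g a b + ind a r * ind b c * v := by
  unfold dmgAdd ind; split_ifs <;> simp_all

-- A's skill loop, pointwise
theorem foldA (sk : List (List Int)) (g : Int → Int → Int) (n m : Int) :
    (sk.foldl (fun dp s =>
      match s with
      | [t, r1, c1, r2, c2, d] =>
          dpAdd (dpAdd (dpAdd (dpAdd dp (r1+1) (c1+1) ((if t = 1 then (-1:Int) else 1)*d))
            (r2+2) (c2+2) ((if t = 1 then (-1:Int) else 1)*d)) (r1+1) (c2+2)
            (-((if t = 1 then (-1:Int) else 1)*d))) (r2+2) (c1+1) (-((if t = 1 then (-1:Int) else 1)*d))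
      | _ => dp) g) n m = g n m + (sk.map (fun s => pdelta s n m)).sum := by
  induction sk generalizing g with
  | nil => simp
  | cons s sk ih =>
    rw [List.foldl_cons, ih, List.map_cons, List.sum_cons]
    have hstep : ∀ (g : Int → Int → Int),
        (match s with
        | [t, r1, c1, r2, c2, d] =>
            dpAdd (dpAdd (dpAdd (dpAdd g (r1+1) (c1+1) ((if t = 1 then (-1:Int) else 1)*d))
              (r2+2) (c2+2) ((if t = 1 then (-1:Int) else 1)*d)) (r1+1) (c2+2)
              (-((if t = 1 then (-1:Int) else 1)*d))) (r2+2) (c1+1) (-((if t = 1 then (-1:Int) else 1)*d))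
        | _ => g) n m = g n m + pdelta s n m := by
      intro g
      rcases s with _ | ⟨t, _ | ⟨r1, _ | ⟨c1, _ | ⟨r2, _ | ⟨c2, _ | ⟨d, _ | ⟨x, rest⟩⟩⟩⟩⟩⟩⟩ <;>
        simp only [pdelta] <;>
        first
          | (simp only [dpAdd_apply]; ring)
          | simp
    rw [hstep]; ring

-- inner prefix pass along one row
theorem rowfold (K : Nat) (g : Int → Int → Int) (n : Int) :
    (∀ a b : Int, (a ≠ n ∨ b ≤ 0 ∨ (K : Int) < b) →
      ((PySem.List.pyRange 1 ((K : Int) + 1) 1).foldl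
        (fun dp m => dpAdd dp n m (dp n (m-1))) g) a b = g a b) ∧
    (∀ b : Nat, b ≤ K →
      ((PySem.List.pyRange 1 ((K : Int) + 1) 1).foldl
        (fun dp m => dpAdd dp n m (dp n (m-1))) g) n (b : Int) = rsum g n b) := by
  induction K with
  | zero =>
    rw [PySem.List.pyRange_one_eq_nil (by omega)]
    constructor
    · intro a b _; rfl
    · intro b hb
      interval_cases b
      simp [rsum]
  | succ K ih =>
    have hrange : PySem.List.pyRange 1 (((K + 1 : Nat) : Int) + 1) 1
        = PySem.List.pyRange 1 ((K : Int) + 1) 1 ++ [(K : Int) + 1] := by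
      rw [show ((K + 1 : Nat) : Int) + 1 = ((K : Int) + 1) + 1 by push_cast; ring,
        PySem.List.pyRange_one_succ_right (by omega)]
    rw [hrange]
    constructor
    · intro a b hab
      rw [List.foldl_append, List.foldl_cons, List.foldl_nil, dpAdd_apply]
      have hz : ind a n * ind b ((K : Int) + 1) = 0 := by
        unfold ind; split_ifs <;> push_cast at hab ⊢ <;> simp_all
      rw [hz, zero_mul, add_zero]
      exact ih.1 a b (by push_cast at hab; omega)
    · intro b hb
      rw [List.foldl_append, List.foldl_cons, List.foldl_nil, dpAdd_apply]
      have hprev : ((PySem.List.pyRange 1 ((K : Int) + 1) 1).foldl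
          (fun dp m => dpAdd dp n m (dp n (m-1))) g) n (((K : Int) + 1) - 1) = rsum g n K := by
        rw [show ((K : Int) + 1) - 1 = ((K : Nat) : Int) by ring]
        exact ih.2 K le_rfl
      by_cases hbk : b = K + 1
      · subst hbk
        rw [hprev]
        have hsame : ind n n * ind ((K + 1 : Nat) : Int) ((K : Int) + 1) = 1 := by
          unfold ind; split_ifs <;> push_cast at * <;> simp_all
        have hout : ((PySem.List.pyRange 1 ((K : Int) + 1) 1).foldl
            (fun dp m => dpAdd dp n m (dp n (m-1))) g) n ((K + 1 : Nat) : Int)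
            = g n ((K + 1 : Nat) : Int) := ih.1 n _ (by push_cast; omega)
        rw [hsame, hout, one_mul]
        unfold rsum
        conv_rhs => rw [Finset.sum_range_succ]
        push_cast
        ring
      · have hble : b ≤ K := by omega
        have hz : ind n n * ind ((b : Nat) : Int) ((K : Int) + 1) = 0 := by
          unfold ind; split_ifs <;> simp_all <;> omega
        rw [hz, zero_mul, add_zero]
        exact ih.2 b hble

-- inner prefix pass along one column
theorem colfold (K : Nat) (g : Int → Int → Int) (m : Int) :
    (∀ a b : Int, (b ≠ m ∨ a ≤ 0 ∨ (K : Int) < a) →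
      ((PySem.List.pyRange 1 ((K : Int) + 1) 1).foldl
        (fun dp n => dpAdd dp n m (dp (n-1) m)) g) a b = g a b) ∧
    (∀ a : Nat, a ≤ K →
      ((PySem.List.pyRange 1 ((K : Int) + 1) 1).foldl
        (fun dp n => dpAdd dp n m (dp (n-1) m)) g) (a : Int) m = csum g m a) := by
  induction K with
  | zero =>
    rw [PySem.List.pyRange_one_eq_nil (by omega)]
    constructor
    · intro a b _; rfl
    · intro a ha
      interval_cases a
      simp [csum]
  | succ K ih =>
    have hrange : PySem.List.pyRange 1 (((K + 1 : Nat) : Int) + 1) 1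
        = PySem.List.pyRange 1 ((K : Int) + 1) 1 ++ [(K : Int) + 1] := by
      rw [show ((K + 1 : Nat) : Int) + 1 = ((K : Int) + 1) + 1 by push_cast; ring,
        PySem.List.pyRange_one_succ_right (by omega)]
    rw [hrange]
    constructor
    · intro a b hab
      rw [List.foldl_append, List.foldl_cons, List.foldl_nil, dpAdd_apply]
      have hz : ind a ((K : Int) + 1) * ind b m = 0 := by
        unfold ind; split_ifs <;> push_cast at hab ⊢ <;> simp_all
      rw [hz, zero_mul, add_zero]
      exact ih.1 a b (by push_cast at hab; omega)
    · intro a ha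
      rw [List.foldl_append, List.foldl_cons, List.foldl_nil, dpAdd_apply]
      have hprev : ((PySem.List.pyRange 1 ((K : Int) + 1) 1).foldl
          (fun dp n => dpAdd dp n m (dp (n-1) m)) g) (((K : Int) + 1) - 1) m = csum g m K := by
        rw [show ((K : Int) + 1) - 1 = ((K : Nat) : Int) by ring]
        exact ih.2 K le_rfl
      by_cases hak : a = K + 1
      · subst hak
        rw [hprev]
        have hsame : ind ((K + 1 : Nat) : Int) ((K : Int) + 1) * ind m m = 1 := by
          unfold ind; split_ifs <;> push_cast at * <;> simp_all
        have hout : ((PySem.List.pyRange 1 ((K : Int) + 1) 1).foldl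
            (fun dp n => dpAdd dp n m (dp (n-1) m)) g) ((K + 1 : Nat) : Int) m
            = g ((K + 1 : Nat) : Int) m := ih.1 _ m (by push_cast; omega)
        rw [hsame, hout, one_mul]
        unfold csum
        conv_rhs => rw [Finset.sum_range_succ]
        push_cast
        ring
      · have hale : a ≤ K := by omega
        have hz : ind ((a : Nat) : Int) ((K : Int) + 1) * ind m m = 0 := by
          unfold ind; split_ifs <;> simp_all <;> omega
        rw [hz, zero_mul, add_zero]
        exact ih.2 a hale

-- the whole row pass
theorem rowpass (K : Nat) (ns : List Int) (hns : ns.Nodup) (g : Int → Int → Int) (a b : Int) :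
    (ns.foldl (fun dp n =>
      (PySem.List.pyRange 1 ((K : Int) + 1) 1).foldl
        (fun dp m => dpAdd dp n m (dp n (m-1))) dp) g) a b
    = if a ∈ ns ∧ 0 ≤ b ∧ b ≤ (K : Int) then rsum g a b.toNat else g a b := by
  induction ns generalizing g with
  | nil => simp
  | cons n rest ih =>
    rw [List.foldl_cons, ih (List.Nodup.of_cons hns)]
    rcases hns with _ | ⟨hn, hrest⟩
    by_cases hmem : a ∈ rest
    · have hne : a ≠ n := fun h => hn a hmem h.symm
      by_cases hb : 0 ≤ b ∧ b ≤ (K : Int)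
      · have hcond : (a ∈ rest ∧ 0 ≤ b ∧ b ≤ (K : Int)) := ⟨hmem, hb⟩
        rw [if_pos hcond, if_pos ⟨List.mem_cons_of_mem n hmem, hb⟩]
        unfold rsum
        exact Finset.sum_congr rfl (fun k _ => (rowfold K g n).1 a _ (Or.inl hne))
      · rw [if_neg (fun h => hb h.2), if_neg (fun h => hb h.2)]
        exact (rowfold K g n).1 a b (Or.inl hne)
    · rw [if_neg (fun h => hmem h.1)]
      by_cases han : a = n
      · subst han
        by_cases hb : 0 ≤ b ∧ b ≤ (K : Int)
        · rw [if_pos ⟨List.mem_cons_self, hb⟩]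
          have hbt : ((b.toNat : Nat) : Int) = b := by omega
          have := (rowfold K g a).2 b.toNat (by omega)
          rw [hbt] at this
          exact this
        · rw [if_neg (fun h => hb h.2)]
          exact (rowfold K g a).1 a b (by omega)
      · have : ¬ (a ∈ n :: rest ∧ 0 ≤ b ∧ b ≤ (K : Int)) := by
          intro h
          rcases List.mem_cons.mp h.1 with h' | h'
          · exact han h'
          · exact hmem h'
        rw [if_neg this]
        exact (rowfold K g n).1 a b (Or.inl han)

-- the whole column pass
theorem colpass (K : Nat) (ms : List Int) (hms : ms.Nodup) (g : Int → Int → Int) (a b : Int) :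
    (ms.foldl (fun dp m =>
      (PySem.List.pyRange 1 ((K : Int) + 1) 1).foldl
        (fun dp n => dpAdd dp n m (dp (n-1) m)) dp) g) a b
    = if b ∈ ms ∧ 0 ≤ a ∧ a ≤ (K : Int) then csum g b a.toNat else g a b := by
  induction ms generalizing g with
  | nil => simp
  | cons m rest ih =>
    rw [List.foldl_cons, ih (List.Nodup.of_cons hms)]
    rcases hms with _ | ⟨hm, hrest⟩
    by_cases hmem : b ∈ rest
    · have hne : b ≠ m := fun h => hm b hmem h.symm
      by_cases ha : 0 ≤ a ∧ a ≤ (K : Int)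
      · have hcond : (b ∈ rest ∧ 0 ≤ a ∧ a ≤ (K : Int)) := ⟨hmem, ha⟩
        rw [if_pos hcond, if_pos ⟨List.mem_cons_of_mem m hmem, ha⟩]
        unfold csum
        exact Finset.sum_congr rfl (fun r _ => (colfold K g m).1 _ b (Or.inl hne))
      · rw [if_neg (fun h => ha h.2), if_neg (fun h => ha h.2)]
        exact (colfold K g m).1 a b (Or.inl hne)
    · rw [if_neg (fun h => hmem h.1)]
      by_cases hbm : b = m
      · subst hbm
        by_cases ha : 0 ≤ a ∧ a ≤ (K : Int)
        · rw [if_pos ⟨List.mem_cons_self, ha⟩]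
          have hat : ((a.toNat : Nat) : Int) = a := by omega
          have := (colfold K g b).2 a.toNat (by omega)
          rw [hat] at this
          exact this
        · rw [if_neg (fun h => ha h.2)]
          exact (colfold K g b).1 a b (by omega)
      · have : ¬ (b ∈ m :: rest ∧ 0 ≤ a ∧ a ≤ (K : Int)) := by
          intro h
          rcases List.mem_cons.mp h.1 with h' | h'
          · exact hbm h'
          · exact hmem h'
        rw [if_neg this]
        exact (colfold K g m).1 a b (Or.inl hbm)

-- B's inner column loop of one rectangle
theorem rectfold_inner (lc : List Int) (hc : lc.Nodup) (g : Int → Int → Int) (i v a b : Int) :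
    (lc.foldl (fun g j => dmgAdd g i j v) g) a b
    = g a b + (if a = i ∧ b ∈ lc then v else 0) := by
  induction lc generalizing g with
  | nil => simp
  | cons j rest ih =>
    rw [List.foldl_cons, ih (List.Nodup.of_cons hc)]
    rw [dmgAdd_apply]
    rcases hc with _ | ⟨hj, hrest⟩
    simp only [List.mem_cons, ind]
    split_ifs <;> simp_all
    exact absurd ‹j ∈ rest› (fun h => hj _ h rfl)

-- B's rectangle double loop
theorem rectfold (lr : List Int) (hr : lr.Nodup) (lc : List Int) (hc : lc.Nodup)
    (g : Int → Int → Int) (v a b : Int) :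
    (lr.foldl (fun g i => lc.foldl (fun g j => dmgAdd g i j v) g) g) a b
    = g a b + (if a ∈ lr ∧ b ∈ lc then v else 0) := by
  induction lr generalizing g with
  | nil => simp
  | cons i rest ih =>
    rw [List.foldl_cons, ih (List.Nodup.of_cons hr), rectfold_inner lc hc g i v a b]
    rcases hr with _ | ⟨hi, hrest⟩
    simp only [List.mem_cons]
    by_cases hai : a = i
    · subst hai
      have : a ∉ rest := fun h => hi a h rfl
      split_ifs <;> simp_all
    · split_ifs <;> simp_all

-- B's skill loop, pointwise
theorem foldB (sk : List (List Int)) (g : Int → Int → Int) (a b : Int) :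
    (sk.foldl (fun g s =>
      (PySem.List.pyRange (PySem.List.pyGetD s 1 0) (PySem.List.pyGetD s 3 0 + 1) 1).foldl
        (fun g i =>
          (PySem.List.pyRange (PySem.List.pyGetD s 2 0) (PySem.List.pyGetD s 4 0 + 1) 1).foldl
            (fun g j => dmgAdd g i j
              ((if PySem.List.pyGetD s 0 0 = 1 then (-1:Int) else 1) * PySem.List.pyGetD s 5 0)) g)
        g) g) a b = g a b + (sk.map (fun s => bdelta s a b)).sum := by
  induction sk generalizing g with
  | nil => simp
  | cons s sk ih =>
    rw [List.foldl_cons, ih, List.map_cons, List.sum_cons]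
    have hstep : ∀ (g : Int → Int → Int),
        ((PySem.List.pyRange (PySem.List.pyGetD s 1 0) (PySem.List.pyGetD s 3 0 + 1) 1).foldl
          (fun g i =>
            (PySem.List.pyRange (PySem.List.pyGetD s 2 0) (PySem.List.pyGetD s 4 0 + 1) 1).foldl
              (fun g j => dmgAdd g i j
                ((if PySem.List.pyGetD s 0 0 = 1 then (-1:Int) else 1) * PySem.List.pyGetD s 5 0)) g)
          g) a b = g a b + bdelta s a b := by
      intro g
      rw [rectfold _ (PySem.List.nodup_pyRange_one _ _) _ (PySem.List.nodup_pyRange_one _ _)]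
      congr 1
      unfold bdelta
      simp only [PySem.List.mem_pyRange_one]
      split_ifs
      all_goals try rfl
      all_goals exfalso
      all_goals omega
    rw [hstep]; ring

theorem indsum (R : Nat) (x : Int) :
    (∑ r ∈ Finset.range R, ind (r : Int) x) = if 0 ≤ x ∧ x < (R : Int) then 1 else 0 := by
  induction R with
  | zero => simp only [Finset.range_zero, Finset.sum_empty, Nat.cast_zero]; split_ifs <;> omega
  | succ R ih =>
    rw [Finset.sum_range_succ, ih]
    unfold ind
    split_ifs <;> push_cast at * <;> omega

theorem exch (sk : List (List Int)) (f : List Int → Int → Int → Int) (R K : Nat) :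
    (∑ r ∈ Finset.range R, ∑ k ∈ Finset.range K, (sk.map (fun s => f s (r : Int) (k : Int))).sum)
    = (sk.map (fun s => ∑ r ∈ Finset.range R, ∑ k ∈ Finset.range K, f s (r : Int) (k : Int))).sum := by
  induction sk with
  | nil => simp
  | cons s sk ih =>
    simp only [List.map_cons, List.sum_cons, ← ih, ← Finset.sum_add_distrib]

-- per-skill box sum of pdelta equals bdelta, under the Pre_ constraints for that entry
theorem box_eq (t r1 c1 r2 c2 d i j : Int)
    (h1 : 0 ≤ r1) (h2 : r1 ≤ r2) (h3 : 0 ≤ c1) (h4 : c1 ≤ c2)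
    (hi : 0 ≤ i) (hj : 0 ≤ j) :
    (∑ r ∈ Finset.range ((i+1).toNat + 1), ∑ k ∈ Finset.range ((j+1).toNat + 1),
      pdelta [t, r1, c1, r2, c2, d] (r : Int) (k : Int))
    = (if r1 ≤ i ∧ i ≤ r2 ∧ c1 ≤ j ∧ j ≤ c2 then (if t = 1 then (-1 : Int) else 1) * d else 0) := by
  have hp : ∀ (r k : Int), pdelta [t, r1, c1, r2, c2, d] r k
      = ((if t = 1 then (-1 : Int) else 1) * d) *
        ((ind r (r1+1) - ind r (r2+2)) * (ind k (c1+1) - ind k (c2+2))) := by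
    intro r k; rfl
  simp only [hp]
  have hrw : (∑ r ∈ Finset.range ((i+1).toNat + 1), ∑ k ∈ Finset.range ((j+1).toNat + 1),
      ((if t = 1 then (-1 : Int) else 1) * d) *
        ((ind (r : Int) (r1+1) - ind (r : Int) (r2+2)) * (ind (k : Int) (c1+1) - ind (k : Int) (c2+2))))
      = ((if t = 1 then (-1 : Int) else 1) * d) *
        ((∑ r ∈ Finset.range ((i+1).toNat + 1), (ind (r : Int) (r1+1) - ind (r : Int) (r2+2))) *
         (∑ k ∈ Finset.range ((j+1).toNat + 1), (ind (k : Int) (c1+1) - ind (k : Int) (c2+2)))) := by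
    rw [Finset.sum_mul_sum, Finset.mul_sum]
    refine Finset.sum_congr rfl (fun r _ => ?_)
    rw [Finset.mul_sum]
  rw [hrw, Finset.sum_sub_distrib, Finset.sum_sub_distrib]
  have hI : (((i+1).toNat + 1 : Nat) : Int) = i + 2 := by omega
  have hJ : (((j+1).toNat + 1 : Nat) : Int) = j + 2 := by omega
  have e1 := indsum ((i+1).toNat + 1) (r1+1)
  have e2 := indsum ((i+1).toNat + 1) (r2+2)
  have e3 := indsum ((j+1).toNat + 1) (c1+1)
  have e4 := indsum ((j+1).toNat + 1) (c2+2)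
  rw [hI] at e1 e2
  rw [hJ] at e3 e4
  have hsum1 : (∑ r ∈ Finset.range ((i+1).toNat + 1), ind (r : Int) (r1+1)) = if r1 ≤ i then 1 else 0 := by
    rw [e1]; split_ifs <;> omega
  have hsum2 : (∑ r ∈ Finset.range ((i+1).toNat + 1), ind (r : Int) (r2+2)) = if r2 < i then 1 else 0 := by
    rw [e2]; split_ifs <;> omega
  have hsum3 : (∑ k ∈ Finset.range ((j+1).toNat + 1), ind (k : Int) (c1+1)) = if c1 ≤ j then 1 else 0 := by
    rw [e3]; split_ifs <;> omega
  have hsum4 : (∑ k ∈ Finset.range ((j+1).toNat + 1), ind (k : Int) (c2+2)) = if c2 < j then 1 else 0 := by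
    rw [e4]; split_ifs <;> omega
  rw [hsum1, hsum2, hsum3, hsum4]
  have hbox : ((if r1 ≤ i then (1:Int) else 0) - (if r2 < i then 1 else 0)) *
      ((if c1 ≤ j then (1:Int) else 0) - (if c2 < j then 1 else 0))
      = (if r1 ≤ i ∧ i ≤ r2 ∧ c1 ≤ j ∧ j ≤ c2 then (1:Int) else 0) := by
    by_cases hc : r1 ≤ i ∧ i ≤ r2 ∧ c1 ≤ j ∧ j ≤ c2
    · rw [if_pos hc]; split_ifs <;> omega
    · rw [if_neg hc]; split_ifs <;> omega
  rw [hbox]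
  split_ifs <;> simp_all


theorem pdelta_row_zero (t r1 c1 r2 c2 d b : Int) (h1 : 0 ≤ r1) (h2 : r1 ≤ r2) :
    pdelta [t, r1, c1, r2, c2, d] 0 b = 0 := by
  show ((if t = 1 then (-1 : Int) else 1) * d) *
      ((ind 0 (r1+1) - ind 0 (r2+2)) * (ind b (c1+1) - ind b (c2+2))) = 0
  unfold ind
  split_ifs
  all_goals try ring
  all_goals exfalso
  all_goals omega

-- ===== VERDICT (by name: the statement is the Claim_ definition above) =====
theorem solution_spec : Claim_equal_solution := by
  intro board skill hdom hpre
  unfold Spec_solution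
  simp only [solution, solution_alt]
  apply PySem.List.foldl_congr_mem
  intro acc i hi
  apply PySem.List.foldl_congr_mem
  intro acc2 j hj
  rw [PySem.List.mem_pyRange_one] at hi hj
  obtain ⟨hne, hrows, hsk⟩ := hpre
  have hNr : ((board.length : Int) + 2) = ((board.length + 1 : Nat) : Int) + 1 := by
    push_cast; ring
  have hMr : (((PySem.List.pyGetD board 0 []).length : Int) + 2)
      = (((PySem.List.pyGetD board 0 []).length + 1 : Nat) : Int) + 1 := by
    push_cast; ring
  rw [hNr, hMr]
  rw [colpass (board.length + 1) _ (PySem.List.nodup_pyRange_one _ _)]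
  have hcond : (j + 1) ∈ PySem.List.pyRange 1
        ((((PySem.List.pyGetD board 0 []).length + 1 : Nat) : Int) + 1) 1 ∧
      0 ≤ i + 1 ∧ i + 1 ≤ ((board.length + 1 : Nat) : Int) :=
    ⟨PySem.List.mem_pyRange_one.mpr ⟨by omega, by push_cast; omega⟩,
      by omega, by push_cast; omega⟩
  rw [if_pos hcond]
  have hcol : csum (List.foldl
        (fun dp n =>
          List.foldl (fun dp m => dpAdd dp n m (dp n (m - 1))) dp
            (PySem.List.pyRange 1 ((((PySem.List.pyGetD board 0 []).length + 1 : Nat) : Int) + 1) 1))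
        (List.foldl
          (fun dp s =>
            match s with
            | [t, r1, c1, r2, c2, d] =>
              dpAdd
                (dpAdd
                  (dpAdd (dpAdd dp (r1 + 1) (c1 + 1) ((if t = 1 then -1 else 1) * d)) (r2 + 2) (c2 + 2)
                    ((if t = 1 then -1 else 1) * d))
                  (r1 + 1) (c2 + 2) (-((if t = 1 then -1 else 1) * d)))
                (r2 + 2) (c1 + 1) (-((if t = 1 then -1 else 1) * d))
            | x => dp)
          (fun (_ _ : Int) => (0:Int)) skill)
        (PySem.List.pyRange 1 (((board.length + 1 : Nat) : Int) + 1) 1))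
      (j + 1) (i + 1).toNat
      = (List.foldl
        (fun g s =>
          List.foldl
            (fun g i =>
              List.foldl
                (fun g j => dmgAdd g i j
                  ((if PySem.List.pyGetD s 0 0 = 1 then -1 else 1) * PySem.List.pyGetD s 5 0)) g
                (PySem.List.pyRange (PySem.List.pyGetD s 2 0) (PySem.List.pyGetD s 4 0 + 1) 1))
            g (PySem.List.pyRange (PySem.List.pyGetD s 1 0) (PySem.List.pyGetD s 3 0 + 1) 1))
        (fun (_ _ : Int) => (0:Int)) skill) i j := by
    -- name the point-update grid
    set dp1 := (List.foldl
          (fun dp s =>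
            match s with
            | [t, r1, c1, r2, c2, d] =>
              dpAdd
                (dpAdd
                  (dpAdd (dpAdd dp (r1 + 1) (c1 + 1) ((if t = 1 then -1 else 1) * d)) (r2 + 2) (c2 + 2)
                    ((if t = 1 then -1 else 1) * d))
                  (r1 + 1) (c2 + 2) (-((if t = 1 then -1 else 1) * d)))
                (r2 + 2) (c1 + 1) (-((if t = 1 then -1 else 1) * d))
            | x => dp)
          (fun (_ _ : Int) => (0:Int)) skill) with hdp1
    have hdp1v : ∀ n m : Int, dp1 n m = (skill.map (fun s => pdelta s n m)).sum := by
      intro n m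
      rw [hdp1, foldA]
      ring
    have hdp1_row0 : ∀ m : Int, dp1 0 m = 0 := by
      intro m
      rw [hdp1v]
      apply List.sum_eq_zero
      intro x hx
      obtain ⟨s, hs, hxeq⟩ := List.mem_map.mp hx
      obtain ⟨h6, hr1, hr12, _, _, _, _⟩ := hsk s hs
      rcases s with _ | ⟨t, _ | ⟨r1, _ | ⟨c1, _ | ⟨r2, _ | ⟨c2, _ | ⟨d, _ | ⟨x', rest⟩⟩⟩⟩⟩⟩⟩ <;>
        simp only [List.length] at h6 <;> try omega
      have hg1 : PySem.List.pyGetD [t, r1, c1, r2, c2, d] 1 0 = r1 := rfl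
      have hg3 : PySem.List.pyGetD [t, r1, c1, r2, c2, d] 3 0 = r2 := rfl
      rw [hg1] at hr1
      rw [hg1, hg3] at hr12
      rw [← hxeq, pdelta_row_zero t r1 c1 r2 c2 d m hr1 hr12]
    unfold csum
    have hstep : ∀ r ∈ Finset.range ((i + 1).toNat + 1),
        (List.foldl
          (fun dp n =>
            List.foldl (fun dp m => dpAdd dp n m (dp n (m - 1))) dp
              (PySem.List.pyRange 1 ((((PySem.List.pyGetD board 0 []).length + 1 : Nat) : Int) + 1) 1))
          dp1 (PySem.List.pyRange 1 (((board.length + 1 : Nat) : Int) + 1) 1)) (r : Int) (j + 1)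
        = rsum dp1 (r : Int) (j + 1).toNat := by
      intro r hr
      rw [Finset.mem_range] at hr
      rw [rowpass ((PySem.List.pyGetD board 0 []).length + 1) _ (PySem.List.nodup_pyRange_one _ _)]
      by_cases hr0 : r = 0
      · subst hr0
        rw [if_neg (by
          intro h
          have := PySem.List.mem_pyRange_one.mp h.1
          omega)]
        simp only [Nat.cast_zero]
        rw [hdp1_row0]
        unfold rsum
        symm
        apply Finset.sum_eq_zero
        intro k _
        exact hdp1_row0 (k : Int)
      · have hcond2 : (r : Int) ∈ PySem.List.pyRange 1
              (((board.length + 1 : Nat) : Int) + 1) 1 ∧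
            0 ≤ j + 1 ∧ j + 1 ≤ (((PySem.List.pyGetD board 0 []).length + 1 : Nat) : Int) :=
          ⟨PySem.List.mem_pyRange_one.mpr ⟨by omega, by push_cast; omega⟩,
            by omega, by push_cast; omega⟩
        rw [if_pos hcond2]
    rw [Finset.sum_congr rfl hstep]
    rw [foldB]
    have hiz : (0 : Int) + (skill.map (fun s => bdelta s i j)).sum
        = (skill.map (fun s => bdelta s i j)).sum := by ring
    rw [hiz]
    unfold rsum
    have hexp : ∀ r ∈ Finset.range ((i + 1).toNat + 1),
        (∑ k ∈ Finset.range ((j + 1).toNat + 1), dp1 (r : Int) (k : Int))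
        = ∑ k ∈ Finset.range ((j + 1).toNat + 1), (skill.map (fun s => pdelta s (r : Int) (k : Int))).sum := by
      intro r _
      exact Finset.sum_congr rfl (fun k _ => hdp1v (r : Int) (k : Int))
    rw [Finset.sum_congr rfl hexp, exch]
    refine congrArg List.sum (List.map_congr_left ?_)
    intro s hs
    obtain ⟨h6, hr1, hr12, hr2N, hc1, hc12, hc2M⟩ := hsk s hs
    rcases s with _ | ⟨t, _ | ⟨r1, _ | ⟨c1, _ | ⟨r2, _ | ⟨c2, _ | ⟨d, _ | ⟨x', rest⟩⟩⟩⟩⟩⟩⟩ <;>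
      simp only [List.length] at h6 <;> try omega
    have hg1 : PySem.List.pyGetD [t, r1, c1, r2, c2, d] 1 0 = r1 := rfl
    have hg2 : PySem.List.pyGetD [t, r1, c1, r2, c2, d] 2 0 = c1 := rfl
    have hg3 : PySem.List.pyGetD [t, r1, c1, r2, c2, d] 3 0 = r2 := rfl
    have hg4 : PySem.List.pyGetD [t, r1, c1, r2, c2, d] 4 0 = c2 := rfl
    rw [hg1] at hr1
    rw [hg1, hg3] at hr12
    rw [hg2] at hc1
    rw [hg2, hg4] at hc12
    have hb : bdelta [t, r1, c1, r2, c2, d] i j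
        = (if r1 ≤ i ∧ i ≤ r2 ∧ c1 ≤ j ∧ j ≤ c2 then (if t = 1 then (-1 : Int) else 1) * d else 0) := rfl
    rw [hb]
    exact box_eq t r1 c1 r2 c2 d i j hr1 hr12 hc1 hc12 (by omega) (by omega)
  rw [hcol]
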